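-- pv_equiv track=rewrite | github.com/WinnieHAN/dndmv-pj | pyFile/utils.py | sentence_loader
-- ===== SOURCE A (Python) =====
-- def isnotnum(str):
--     nums = {'0', '1', '2', '3', '4', '5', '6', '7', '8', '9'}
--     for i in str:
--         if i in nums:
--             return False
--     return True
--
-- def sentence_loader(file_h):
--     w2i = {}
--     sentences = [[j if isnotnum(j) else '<num>' for j in i.rstrip("\t").split('\t')] for i in file_h]
--     id = 0
--     for s in sentences:
--         for i in s:
--             if i not in w2i:
--                 w2i[i] = id
--                 id = id + 1
--     w2i['<unknow>'] = id
--     stcs = [[w2i[i] for i in s] for s in sentences]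
--     stcs_len = [len(j) for j in sentences]
--     i2w = {k: i for i, k in w2i.items()}
--     return w2i, i2w, stcs, stcs_len
-- ===== SOURCE B (Python) =====
-- def isnotnum(str):
--     nums = {'0', '1', '2', '3', '4', '5', '6', '7', '8', '9'}
--     for i in str:
--         if i in nums:
--             return False
--     return True
--
-- def sentence_loader(file_h):
--     # single pass: build the vocab and the encoded sentences together
--     w2i = {}
--     stcs = []
--     for line in file_h:
--         enc = []
--         for tok in line.rstrip("\t").split('\t'):
--             if not isnotnum(tok):
--                 tok = '<num>'
--             enc.append(w2i.setdefault(tok, len(w2i)))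
--         stcs.append(enc)
--     w2i['<unknow>'] = len(w2i)
--     stcs_len = [len(s) for s in stcs]
--     i2w = {v: k for k, v in w2i.items()}
--     return w2i, i2w, stcs, stcs_len
-- ===== Notes on version B (the rewrite author's own statement) =====
-- stated objective: simpler
-- what changed: A parses, then builds the vocab in a second full pass and encodes the sentences in a third pass of dict lookups; B builds the vocab and the encoded sentences together in ONE pass via w2i.setdefault(tok, len(w2i)). Pre_ excludes inputs where some tab-separated token is literally '<unknow>': there the sentinel id overwrite collides with a data token, and A's re-encoding via the overwritten id and B's first-occurrence id are both accidental values nobody would specify.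
import Mathlib
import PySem

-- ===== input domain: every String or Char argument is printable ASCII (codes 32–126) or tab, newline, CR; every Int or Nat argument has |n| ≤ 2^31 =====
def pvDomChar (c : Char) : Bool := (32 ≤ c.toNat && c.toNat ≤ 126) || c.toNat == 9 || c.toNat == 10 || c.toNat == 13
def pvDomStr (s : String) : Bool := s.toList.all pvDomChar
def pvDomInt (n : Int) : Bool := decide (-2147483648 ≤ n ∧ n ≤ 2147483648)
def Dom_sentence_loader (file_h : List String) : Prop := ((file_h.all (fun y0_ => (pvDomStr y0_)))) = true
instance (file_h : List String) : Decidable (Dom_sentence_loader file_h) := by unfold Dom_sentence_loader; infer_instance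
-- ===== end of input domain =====

-- B fuses A's vocab-building pass and encoding pass into one pass (setdefault); return-value equivalence proved under Pre_.

-- ===== PORT A =====
-- isnotnum: loop over the characters, return False on the first digit
def pvIsnotnumGo : List Char → Bool
  | [] => true
  | c :: rest => if c ∈ ['0', '1', '2', '3', '4', '5', '6', '7', '8', '9'] then false else pvIsnotnumGo rest

def isnotnumP (s : String) : Bool := pvIsnotnumGo s.toList

-- i.rstrip("\t"): drop trailing tab characters (ported by hand, exact: rstrip with an explicit chars argument)
def pvRstripTabs (s : String) : String := String.mk ((s.toList.reverse.dropWhile (fun c => c = '\t')).reverse)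

-- the comprehension [j if isnotnum(j) else '<num>' for j in i.rstrip("\t").split('\t')] (identical in A and B)
def pvParseLine (i : String) : List String :=
  ((PySem.Str.split? (pvRstripTabs i) "\t").getD []).map (fun j => if isnotnumP j then j else "<num>")

def sentence_loader (file_h : List String) : (List (String × Int)) × (List (Int × String)) × List (List Int) × List Int :=
  let sentences := file_h.map pvParseLine
  -- pass 1: build w2i with a running id counter
  let st := sentences.foldl
    (fun st s => s.foldl
      (fun (st : PySem.Dict String Int × Int) i =>
        if st.1.contains i then st else (st.1.insert i st.2, st.2 + 1)) st)
    (PySem.Dict.empty, (0 : Int))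
  let w2i := st.1.insert "<unknow>" st.2
  -- pass 2: encode by lookup (w2i[i]; the key is always present, so .getD 0 is exact)
  let stcs := sentences.map (fun s => s.map (fun i => (w2i.get? i).getD 0))
  let stcs_len := sentences.map (fun j => (j.length : Int))
  let i2w := PySem.Dict.ofList (w2i.items.map (fun p => (p.2, p.1)))
  (w2i.items, i2w.items, stcs, stcs_len)

-- ===== PORT B =====
-- one token of B's single pass: enc.append(w2i.setdefault(tok, len(w2i))) after the '<num>' substitution
def pvEncTok (p : PySem.Dict String Int × List Int) (tok0 : String) : PySem.Dict String Int × List Int :=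
  let tok := if isnotnumP tok0 then tok0 else "<num>"
  let v : Int := (p.1.get? tok).getD (p.1.size : Int)
  (p.1.setdefault tok (p.1.size : Int), p.2 ++ [v])

def sentence_loader_alt (file_h : List String) : (List (String × Int)) × (List (Int × String)) × List (List Int) × List Int :=
  -- single pass over the lines: vocab and encoded sentences built together
  let st := file_h.foldl
    (fun (st : PySem.Dict String Int × List (List Int)) line =>
      let p := ((PySem.Str.split? (pvRstripTabs line) "\t").getD []).foldl pvEncTok (st.1, [])
      (p.1, st.2 ++ [p.2]))
    (PySem.Dict.empty, [])
  let w2i := st.1.insert "<unknow>" (st.1.size : Int)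
  let stcs := st.2
  let stcs_len := stcs.map (fun s => (s.length : Int))
  let i2w := PySem.Dict.ofList (w2i.items.map (fun p => (p.2, p.1)))
  (w2i.items, i2w.items, stcs, stcs_len)

-- ===== PRECONDITION & SPEC =====
-- Pre_ excludes inputs where some tab-separated token is literally '<unknow>': there the sentinel
-- collides with a data token, A re-encodes it with the overwritten sentinel id and B with its
-- first-occurrence id — both accidental values nobody would specify.
def Pre_sentence_loader (file_h : List String) : Prop :=
  ∀ line ∈ file_h,
    "<unknow>" ∉ (PySem.Str.split? (String.mk ((line.toList.reverse.dropWhile (fun c => c = '\t')).reverse)) "\t").getD []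

instance (file_h : List String) : Decidable (Pre_sentence_loader file_h) := by
  unfold Pre_sentence_loader; infer_instance

def pvWitness_sentence_loader : List String := ["a\tb\t7\ta", "c"]

def Spec_sentence_loader (file_h : List String) (out : (List (String × Int)) × (List (Int × String)) × List (List Int) × List Int) : Prop := out = sentence_loader_alt file_h
instance (file_h : List String) (out : (List (String × Int)) × (List (Int × String)) × List (List Int) × List Int) : Decidable (Spec_sentence_loader file_h out) := by unfold Spec_sentence_loader; infer_instance

-- ===== CLAIM (what is proved, stated in full; the proofs are below) =====
def Claim_equal_sentence_loader : Prop := ∀ (file_h : List String), Dom_sentence_loader file_h → Pre_sentence_loader file_h → Spec_sentence_loader file_h (sentence_loader file_h)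

-- ===== LEMMAS AND PROOFS =====

-- the dict step both sides reduce to: d.setdefault t len(d)
def sdStep (d : PySem.Dict String Int) (t : String) : PySem.Dict String Int :=
  d.setdefault t (d.size : Int)

-- the '<num>' substitution
def pvSub (t : String) : String := if isnotnumP t then t else "<num>"

lemma stepA_eq (d : PySem.Dict String Int) (t : String) :
    (if d.contains t then (d, (d.size : Int)) else (d.insert t (d.size : Int), (d.size : Int) + 1))
      = (sdStep d t, ((sdStep d t).size : Int)) := by
  by_cases h : d.contains t = true
  · simp [sdStep, PySem.Dict.setdefault_of_contains d _ h, h]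
  · rw [sdStep, PySem.Dict.setdefault_of_not_contains d _ (by simp [h])]
    simp [h, PySem.Dict.size_insert]

lemma foldA_sent (s : List String) (d : PySem.Dict String Int) :
    s.foldl (fun (st : PySem.Dict String Int × Int) i =>
        if st.1.contains i then st else (st.1.insert i st.2, st.2 + 1)) (d, (d.size : Int))
      = (s.foldl sdStep d, ((s.foldl sdStep d).size : Int)) := by
  induction s generalizing d with
  | nil => rfl
  | cons t rest ih =>
      simp only [List.foldl_cons]
      rw [show (if d.contains t then (d, (d.size : Int)) else (d.insert t (d.size : Int), (d.size : Int) + 1))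
            = (sdStep d t, ((sdStep d t).size : Int)) from stepA_eq d t]
      exact ih (sdStep d t)

lemma foldA_all (ss : List (List String)) (d : PySem.Dict String Int) :
    ss.foldl (fun st s => s.foldl (fun (st : PySem.Dict String Int × Int) i =>
        if st.1.contains i then st else (st.1.insert i st.2, st.2 + 1)) st) (d, (d.size : Int))
      = (ss.foldl (fun d s => s.foldl sdStep d) d, ((ss.foldl (fun d s => s.foldl sdStep d) d).size : Int)) := by
  induction ss generalizing d with
  | nil => rfl
  | cons s rest ih =>
      simp only [List.foldl_cons]
      rw [foldA_sent]
      exact ih (s.foldl sdStep d)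

lemma get?_sdStep_mono {d : PySem.Dict String Int} {t : String} {v : Int}
    (h : d.get? t = some v) (u : String) : (sdStep d u).get? t = some v := by
  by_cases hu : t = u
  · subst hu
    rw [sdStep, PySem.Dict.get?_setdefault_self, h]
    rfl
  · rw [sdStep, PySem.Dict.get?_setdefault_of_ne _ _ hu, h]

lemma get?_sdFold_mono (s : List String) {d : PySem.Dict String Int} {t : String} {v : Int}
    (h : d.get? t = some v) : ((s.foldl sdStep d).get? t) = some v := by
  induction s generalizing d with
  | nil => exact h
  | cons u rest ih => exact ih (get?_sdStep_mono h u)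

lemma get?_sdFoldAll_mono (ss : List (List String)) {d : PySem.Dict String Int} {t : String} {v : Int}
    (h : d.get? t = some v) : ((ss.foldl (fun d s => s.foldl sdStep d) d).get? t) = some v := by
  induction ss generalizing d with
  | nil => exact h
  | cons s rest ih => exact ih (get?_sdFold_mono s h)

lemma key_after_sdFold (s : List String) (d : PySem.Dict String Int) :
    ∀ t ∈ s, ∃ v, ((s.foldl sdStep d).get? t) = some v := by
  induction s generalizing d with
  | nil => intro t ht; cases ht
  | cons u rest ih =>
      intro t ht
      rcases List.mem_cons.mp ht with h | h
      · subst h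
        refine ⟨(d.get? t).getD (d.size : Int), ?_⟩
        exact get?_sdFold_mono rest (by rw [sdStep, PySem.Dict.get?_setdefault_self])
      · exact ih (sdStep d u) t h

def encTok (p : PySem.Dict String Int × List Int) (t : String) : PySem.Dict String Int × List Int :=
  (sdStep p.1 t, p.2 ++ [(p.1.get? t).getD (p.1.size : Int)])

lemma encFold (s : List String) (d : PySem.Dict String Int) (acc : List Int) :
    s.foldl encTok (d, acc)
      = (s.foldl sdStep d, acc ++ s.map (fun t => ((s.foldl sdStep d).get? t).getD 0)) := by
  induction s generalizing d acc with
  | nil => simp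
  | cons t rest ih =>
      simp only [List.foldl_cons, List.map_cons]
      rw [show encTok (d, acc) t = (sdStep d t, acc ++ [(d.get? t).getD (d.size : Int)]) from rfl]
      rw [ih (sdStep d t)]
      have hsome : ((rest.foldl sdStep (sdStep d t)).get? t) = some ((d.get? t).getD (d.size : Int)) :=
        get?_sdFold_mono rest (by rw [sdStep, PySem.Dict.get?_setdefault_self])
      rw [hsome]
      simp

lemma encFold_raw (raw : List String) (d : PySem.Dict String Int) (acc : List Int) :
    raw.foldl pvEncTok (d, acc) = (raw.map pvSub).foldl encTok (d, acc) := by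
  rw [List.foldl_map]; rfl

lemma parseLine_eq_map_sub (line : String) :
    pvParseLine line = ((PySem.Str.split? (pvRstripTabs line) "\t").getD []).map pvSub := rfl

set_option maxHeartbeats 1000000 in
lemma bFold (ls : List String) (d : PySem.Dict String Int) (acc : List (List Int)) :
    ls.foldl (fun (st : PySem.Dict String Int × List (List Int)) line =>
        let p := ((PySem.Str.split? (pvRstripTabs line) "\t").getD []).foldl pvEncTok (st.1, [])
        (p.1, st.2 ++ [p.2])) (d, acc)
      = ((ls.map pvParseLine).foldl (fun d s => s.foldl sdStep d) d,
         acc ++ (ls.map pvParseLine).map (fun s => s.map (fun t =>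
           (((ls.map pvParseLine).foldl (fun d s => s.foldl sdStep d) d).get? t).getD 0))) := by
  induction ls generalizing d acc with
  | nil => simp
  | cons l rest ih =>
      simp only [List.foldl_cons, List.map_cons]
      rw [encFold_raw, ← parseLine_eq_map_sub, encFold, ih]
      have he : (pvParseLine l).map (fun t => ((List.foldl sdStep d (pvParseLine l)).get? t).getD 0)
          = (pvParseLine l).map (fun t => (((rest.map pvParseLine).foldl (fun d s => s.foldl sdStep d)
              ((pvParseLine l).foldl sdStep d)).get? t).getD 0) := by
        apply List.map_congr_left
        intro t ht
        obtain ⟨v, hv⟩ := key_after_sdFold (pvParseLine l) d t ht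
        rw [hv, get?_sdFoldAll_mono (rest.map pvParseLine) hv]
      refine Prod.ext rfl ?_
      simp only [List.nil_append]
      rw [he]
      simp

lemma token_ne_unknow (line : String)
    (h : "<unknow>" ∉ (PySem.Str.split? (pvRstripTabs line) "\t").getD []) :
    ∀ t ∈ pvParseLine line, t ≠ "<unknow>" := by
  intro t ht
  rw [parseLine_eq_map_sub] at ht
  obtain ⟨j, hj, rfl⟩ := List.mem_map.mp ht
  unfold pvSub
  split_ifs with hnum
  · intro hEq; exact h (hEq ▸ hj)
  · decide

set_option maxHeartbeats 1000000 in
theorem sentence_loader_spec : Claim_equal_sentence_loader := by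
  intro file_h _ hpre
  unfold Spec_sentence_loader
  simp only [sentence_loader, sentence_loader_alt]
  rw [show ((PySem.Dict.empty : PySem.Dict String Int), (0 : Int))
        = ((PySem.Dict.empty : PySem.Dict String Int), (((PySem.Dict.empty : PySem.Dict String Int)).size : Int)) by
      simp [PySem.Dict.size_empty]]
  rw [foldA_all, bFold]
  refine Prod.ext rfl (Prod.ext rfl (Prod.ext ?_ ?_))
  · -- stcs: the '<unknow>' insertion does not change any looked-up token under Pre_
    apply List.map_congr_left
    intro s hs
    apply List.map_congr_left
    intro t ht
    obtain ⟨line, hline, rfl⟩ := List.mem_map.mp hs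
    have hne : t ≠ "<unknow>" := token_ne_unknow line (hpre line hline) t ht
    rw [PySem.Dict.get?_insert_of_ne _ _ hne]
  · -- stcs_len: mapping the lengths of the sentences = lengths of the encodings
    simp [List.map_map, Function.comp]
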